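-- pv_equiv track=rewrite | github.com/thomasguo42/AI_Online_Software | your_scripts/bout_analysis.py | merge_nearby_extension_frames
-- ===== SOURCE A (Python) =====
-- def merge_nearby_extension_frames(extension_frames, min_gap=2, min_duration=5):
--     """
--     Merge extension frames that are close together and filter by minimum duration.
--
--     Parameters:
--     - extension_frames: List of frame numbers
--     - min_gap: Minimum gap between separate extensions (frames)
--     - min_duration: Minimum duration for a valid extension (frames)
--
--     Returns:
--     - List of tuples (start_frame, end_frame) for valid extensions
--     """
--     if not extension_frames:
--         return []
--
--     extension_frames = sorted(extension_frames)
--     merged_intervals = []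
--     current_start = extension_frames[0]
--     current_end = extension_frames[0]
--
--     for frame in extension_frames[1:]:
--         if frame - current_end <= min_gap:
--             # Extend current interval
--             current_end = frame
--         else:
--             # Check if current interval is long enough
--             if current_end - current_start + 1 >= min_duration:
--                 merged_intervals.append((current_start, current_end))
--             # Start new interval
--             current_start = frame
--             current_end = frame
--
--     # Don't forget the last interval
--     if current_end - current_start + 1 >= min_duration:
--         merged_intervals.append((current_start, current_end))
--
--     return merged_intervals
-- ===== SOURCE B (Python) =====
-- def merge_nearby_extension_frames(extension_frames, min_gap=2, min_duration=5):
--     """Boundary-detection re-implementation: scan adjacent pairs of the sorted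
--     frames once to collect run starts and run ends independently (a pair with
--     gap > min_gap ends one run and starts the next), then zip the two boundary
--     lists into intervals and filter by duration.  No running accumulator."""
--     s = sorted(extension_frames)
--     if not s:
--         return []
--     pairs = list(zip(s, s[1:]))
--     starts = [s[0]] + [b for a, b in pairs if b - a > min_gap]
--     ends = [a for a, b in pairs if b - a > min_gap] + [s[-1]]
--     return [(st, en) for st, en in zip(starts, ends) if en - st + 1 >= min_duration]
-- ===== Notes on version B (the rewrite author's own statement) =====
-- stated objective: alternative
-- what changed: Replaces A's running-accumulator merge (current_start/current_end state with inline emission and a trailing-interval epilogue) by stateless boundary detection: one scan of adjacent sorted pairs yields the run-start and run-end boundary lists independently, which are then zipped into intervals and filtered by duration.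
import Mathlib
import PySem

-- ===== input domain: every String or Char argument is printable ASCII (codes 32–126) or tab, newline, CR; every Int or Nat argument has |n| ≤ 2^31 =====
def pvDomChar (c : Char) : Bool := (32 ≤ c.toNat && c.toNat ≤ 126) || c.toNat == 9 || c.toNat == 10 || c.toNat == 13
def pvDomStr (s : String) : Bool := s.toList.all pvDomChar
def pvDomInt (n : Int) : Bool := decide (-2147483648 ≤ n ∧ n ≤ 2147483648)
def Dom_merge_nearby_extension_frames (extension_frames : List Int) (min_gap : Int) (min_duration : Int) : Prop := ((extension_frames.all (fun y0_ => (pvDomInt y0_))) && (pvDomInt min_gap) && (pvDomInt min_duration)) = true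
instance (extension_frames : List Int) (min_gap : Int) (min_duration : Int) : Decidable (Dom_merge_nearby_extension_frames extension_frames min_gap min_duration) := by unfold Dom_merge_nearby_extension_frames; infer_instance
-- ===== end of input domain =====

-- B replaces A's running-accumulator merge by stateless boundary detection over adjacent
-- sorted pairs (independent start/end boundary lists, zipped and filtered); alternative structure, same cost.


-- ===== PORT A =====
-- the loop body of A's `for frame in extension_frames[1:]` (state: current_start, current_end, merged_intervals)
def pvStepA (min_gap min_duration : Int) (st : Int × Int × List (Int × Int)) (frame : Int) : Int × Int × List (Int × Int) :=
  if frame - st.2.1 ≤ min_gap then (st.1, frame, st.2.2)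
  else if st.2.1 - st.1 + 1 ≥ min_duration then (frame, frame, st.2.2 ++ [(st.1, st.2.1)])
  else (frame, frame, st.2.2)

-- A's trailing "don't forget the last interval" step
def pvFinishA (min_duration : Int) (st : Int × Int × List (Int × Int)) : List (Int × Int) :=
  if st.2.1 - st.1 + 1 ≥ min_duration then st.2.2 ++ [(st.1, st.2.1)] else st.2.2

def merge_nearby_extension_frames (extension_frames : List Int) (min_gap : Int) (min_duration : Int) : List (Int × Int) :=
  if extension_frames = [] then []
  else
    match PySem.List.sorted extension_frames (fun x => x) false with
    | [] => []  -- unreachable: sorted of a nonempty list is nonempty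
    | h :: t => pvFinishA min_duration (t.foldl (pvStepA min_gap min_duration) (h, h, []))

-- ===== PORT B =====
-- Source B: pairs = zip(s, s[1:]); starts/ends are the filtered boundary comprehensions; zip + duration filter
def merge_nearby_extension_frames_alt (extension_frames : List Int) (min_gap : Int) (min_duration : Int) : List (Int × Int) :=
  match PySem.List.sorted extension_frames (fun x => x) false with
  | [] => []                                  -- `if not s: return []`
  | h :: t =>
    let pairs := (h :: t).zip t               -- zip(s, s[1:])  (s[1:] = tail of the nonempty s)
    let starts := h :: (pairs.filter (fun p => decide (p.2 - p.1 > min_gap))).map Prod.snd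
    let ends := (pairs.filter (fun p => decide (p.2 - p.1 > min_gap))).map Prod.fst ++ [(h :: t).getLastD 0]  -- s[-1]
    (starts.zip ends).filter (fun p => decide (p.2 - p.1 + 1 ≥ min_duration))

-- ===== PRECONDITION & SPEC =====
def Spec_merge_nearby_extension_frames (extension_frames : List Int) (min_gap : Int) (min_duration : Int) (out : List (Int × Int)) : Prop := out = merge_nearby_extension_frames_alt extension_frames min_gap min_duration
instance (extension_frames : List Int) (min_gap : Int) (min_duration : Int) (out : List (Int × Int)) : Decidable (Spec_merge_nearby_extension_frames extension_frames min_gap min_duration out) := by unfold Spec_merge_nearby_extension_frames; infer_instance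

-- ===== CLAIM (what is proved, stated in full; the proofs are below) =====
def Claim_equal_merge_nearby_extension_frames : Prop := ∀ (extension_frames : List Int) (min_gap : Int) (min_duration : Int), Dom_merge_nearby_extension_frames extension_frames min_gap min_duration → Spec_merge_nearby_extension_frames extension_frames min_gap min_duration (merge_nearby_extension_frames extension_frames min_gap min_duration)

-- ===== LEMMAS AND PROOFS =====

-- common characterisation: intervals produced from the run currently spanning [cs, prev] followed by frames t
def pvRec (min_gap min_duration : Int) (cs prev : Int) : List Int → List (Int × Int)
  | [] => if prev - cs + 1 ≥ min_duration then [(cs, prev)] else []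
  | f :: t =>
    if f - prev ≤ min_gap then pvRec min_gap min_duration cs f t
    else (if prev - cs + 1 ≥ min_duration then [(cs, prev)] else []) ++ pvRec min_gap min_duration f f t

theorem pvFoldA_spec (g d : Int) : ∀ (t : List Int) (cs ce : Int) (acc : List (Int × Int)),
    pvFinishA d (t.foldl (pvStepA g d) (cs, ce, acc)) = acc ++ pvRec g d cs ce t := by
  intro t
  induction t with
  | nil =>
    intro cs ce acc
    simp only [List.foldl_nil, pvFinishA, pvRec]
    split_ifs <;> simp
  | cons f t ih =>
    intro cs ce acc
    simp only [List.foldl_cons, pvStepA, pvRec]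
    split_ifs with h1 h2
    · exact ih cs f acc
    · rw [ih f f (acc ++ [(cs, ce)])]; simp
    · rw [ih f f acc]; simp

theorem pvB_spec (g d : Int) : ∀ (t : List Int) (prev cs : Int),
    (((cs :: ((((prev :: t).zip t).filter (fun p => decide (p.2 - p.1 > g))).map Prod.snd)).zip
      (((((prev :: t).zip t).filter (fun p => decide (p.2 - p.1 > g))).map Prod.fst)
        ++ [(prev :: t).getLastD 0])).filter (fun p => decide (p.2 - p.1 + 1 ≥ d)))
    = pvRec g d cs prev t := by
  intro t
  induction t with
  | nil =>
    intro prev cs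
    have hl : (prev :: ([] : List Int)).getLastD 0 = prev := rfl
    simp only [List.zip_nil_right, List.filter_nil, List.map_nil, List.nil_append, hl,
      List.zip_cons_cons, List.filter_cons, decide_eq_true_eq, pvRec]
  | cons f t ih =>
    intro prev cs
    have hz : (prev :: f :: t).zip (f :: t) = (prev, f) :: (f :: t).zip t := by simp
    rw [hz]
    by_cases hcut : f - prev > g
    · simp only [List.filter_cons, decide_eq_true_eq, if_pos hcut, List.map_cons,
        List.cons_append, List.zip_cons_cons, List.filter_cons]
      have hlast : (prev :: f :: t).getLastD 0 = (f :: t).getLastD 0 := by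
        simp [List.getLastD_eq_getLast?]
      rw [hlast]
      have hrec : pvRec g d cs prev (f :: t)
          = (if prev - cs + 1 ≥ d then [(cs, prev)] else []) ++ pvRec g d f f t := by
        rw [pvRec]; rw [if_neg (by omega)]
      rw [hrec, ← ih f f]
      split_ifs with h
      · simp_all
      · simp_all
    · simp only [List.filter_cons, decide_eq_true_eq, if_neg hcut]
      have hlast : (prev :: f :: t).getLastD 0 = (f :: t).getLastD 0 := by
        simp [List.getLastD_eq_getLast?]
      rw [hlast]
      have hrec : pvRec g d cs prev (f :: t) = pvRec g d cs f t := by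
        rw [pvRec]; rw [if_pos (by omega)]
      rw [hrec, ← ih f cs]
-- ===== VERDICT (by name: the statement is the Claim_ definition above) =====
theorem merge_nearby_extension_frames_spec : Claim_equal_merge_nearby_extension_frames := by
  intro ef g d _
  show merge_nearby_extension_frames ef g d = merge_nearby_extension_frames_alt ef g d
  unfold merge_nearby_extension_frames merge_nearby_extension_frames_alt
  by_cases hef : ef = []
  · subst hef; simp [PySem.List.sorted]
  · rw [if_neg hef]
    cases hs : PySem.List.sorted ef (fun x => x) false with
    | nil => rfl
    | cons h t =>
      dsimp only
      rw [pvFoldA_spec g d t h h []]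
      rw [pvB_spec g d t h h]
      simp
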